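-- pv_equiv track=rewrite | github.com/johnsonice/nlu_parsing | src/corpus_eda/vocab_summary.py | group_pos
-- ===== SOURCE A (Python) =====
-- def group_pos(pos):
--     groups = {'n':['ns', 'n', 'nt', 'nr', 'nrt', 'nz'],
--               'v':['v', 'vg', 'vd','vn'],
--               'a':['ag', 'a', 'ad','an'],
--               'd':['df']
--               }
--
--     for k,v in groups.items():
--         if pos in v:
--             return k
--
--     return pos
-- ===== SOURCE B (Python) =====
-- _KNOWN_TAGS = frozenset([
--     'ns', 'n', 'nt', 'nr', 'nrt', 'nz',
--     'v', 'vg', 'vd', 'vn',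
--     'ag', 'a', 'ad', 'an',
--     'df',
-- ])
--
-- def group_pos(pos):
--     # Every known tag's group label is its first character, so no label table
--     # is needed: derive the label from the tag itself.
--     return pos[0] if pos in _KNOWN_TAGS else pos
-- ===== Notes on version B (the rewrite author's own statement) =====
-- stated objective: alternative
-- what changed: Drops the group-label table entirely: B keeps only the flat set of known tags and computes the group label as the tag's first character (every group key in A's table equals its members' first character), returning pos unchanged otherwise.
import Mathlib
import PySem

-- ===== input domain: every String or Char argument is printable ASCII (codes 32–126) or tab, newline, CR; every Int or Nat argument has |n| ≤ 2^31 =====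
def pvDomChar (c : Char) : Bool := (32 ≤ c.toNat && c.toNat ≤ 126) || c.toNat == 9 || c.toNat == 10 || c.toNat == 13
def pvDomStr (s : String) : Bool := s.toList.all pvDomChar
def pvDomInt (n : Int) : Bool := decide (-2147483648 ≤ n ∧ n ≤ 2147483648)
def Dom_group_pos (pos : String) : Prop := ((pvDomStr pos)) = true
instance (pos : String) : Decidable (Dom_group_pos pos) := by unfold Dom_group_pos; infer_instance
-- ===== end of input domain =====

-- B stores no group labels: it keeps only the flat set of known tags and computes the
-- label as the tag's first character (each group key in A's table equals its members'
-- first character), returning pos unchanged for unknown tags (objective: alternative).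

-- ===== PORT A =====
-- A's groups dict, in insertion order (only iterated over, so kept as a pair list)
def groupPosGroups : List (String × List String) :=
  [("n", ["ns", "n", "nt", "nr", "nrt", "nz"]),
   ("v", ["v", "vg", "vd", "vn"]),
   ("a", ["ag", "a", "ad", "an"]),
   ("d", ["df"])]

-- the 'for k,v in groups.items(): if pos in v: return k' loop with early return
def groupPosLoop (pos : String) : List (String × List String) → String
  | [] => pos
  | (k, v) :: rest => if pos ∈ v then k else groupPosLoop pos rest

def group_pos (pos : String) : String := groupPosLoop pos groupPosGroups

-- ===== PORT B =====
-- _KNOWN_TAGS, the flat set of tags (PySem.Set: distinct elements)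
def groupPosKnownTags : PySem.Set String :=
  PySem.Set.ofList ["ns", "n", "nt", "nr", "nrt", "nz",
                    "v", "vg", "vd", "vn",
                    "ag", "a", "ad", "an",
                    "df"]

-- 'pos[0] if pos in _KNOWN_TAGS else pos'; pos[0] via PySem.Str.pyGet?
-- (none = IndexError, unreachable here since every known tag is nonempty)
def group_pos_alt (pos : String) : String :=
  if pos ∈ groupPosKnownTags then
    ((PySem.Str.pyGet? pos 0).map String.singleton).getD pos
  else pos

-- ===== PRECONDITION & SPEC =====
def Spec_group_pos (pos : String) (out : String) : Prop := out = group_pos_alt pos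
instance (pos : String) (out : String) : Decidable (Spec_group_pos pos out) := by unfold Spec_group_pos; infer_instance

-- ===== CLAIM =====
def Claim_equal_group_pos : Prop := ∀ (pos : String), Dom_group_pos pos → Spec_group_pos pos (group_pos pos)

-- ===== LEMMAS AND PROOFS =====

-- ===== VERDICT =====
theorem group_pos_spec : Claim_equal_group_pos := by
  intro pos _
  unfold Spec_group_pos
  by_cases h : pos ∈ groupPosKnownTags
  · -- known tag: finitely many cases, each side evaluates to a literal
    simp only [groupPosKnownTags, PySem.Set.mem_ofList, List.mem_cons,
      List.not_mem_nil, or_false] at h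
    rcases h with rfl | rfl | rfl | rfl | rfl | rfl | rfl | rfl | rfl | rfl | rfl | rfl | rfl | rfl | rfl <;> decide
  · -- unknown tag: A's loop falls through every membership test, B takes the else branch
    have h' := h
    simp only [groupPosKnownTags, PySem.Set.mem_ofList, List.mem_cons,
      List.not_mem_nil, or_false, not_or] at h'
    obtain ⟨h1, h2, h3, h4, h5, h6, h7, h8, h9, h10, h11, h12, h13, h14, h15⟩ := h'
    simp [group_pos, group_pos_alt, groupPosGroups, groupPosLoop, h,
      h1, h2, h3, h4, h5, h6, h7, h8, h9, h10, h11, h12, h13, h14, h15]
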